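-- pv_equiv track=rewrite | github.com/WeizhenWang-1210/MetaVQA | vqa/scenario_dynamic_generation.py | find_valid_car_pairs
-- ===== SOURCE A (Python) =====
-- def find_valid_car_pairs(scene_info):
--     """
--     Identifies valid pairs of cars that share at least one episode.
--
--     :param scene_info: A dictionary containing scene information, where keys are car IDs and values are dictionaries
--                        with episode names as keys and episode data as values.
--     :return: A set of tuples, each containing a pair of car IDs that appear together in the same episodes.
--     """
--     all_cars = set(scene_info.keys())
--     valid_pairs = set()
--
--     for car1 in all_cars:
--         for car2 in all_cars:
--             if car1 != car2:
--                 episodes_car1 = set(scene_info[car1].keys())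
--                 episodes_car2 = set(scene_info[car2].keys())
--                 if episodes_car1.intersection(episodes_car2):
--                     valid_pairs.add((car1, car2))
--     return valid_pairs
-- ===== SOURCE B (Python) =====
-- def find_valid_car_pairs(scene_info):
--     """
--     Same result as A, via an inverted index: map each episode to the cars
--     that contain it, collect co-occurring ordered pairs from those groups,
--     then emit the pairs of distinct cars.
--     """
--     episode_cars = {}
--     for car, episodes in scene_info.items():
--         for ep in episodes:
--             episode_cars.setdefault(ep, []).append(car)
--     co = set()
--     for cars in episode_cars.values():
--         for c1 in cars:
--             for c2 in cars:
--                 co.add((c1, c2))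
--     return {(c1, c2) for c1 in scene_info for c2 in scene_info
--             if c1 != c2 and (c1, c2) in co}
-- ===== Notes on version B (the rewrite author's own statement) =====
-- stated objective: faster
-- what changed: Replaces the per-pair construction and intersection of episode key-sets with a single inverted episode->cars index from which the co-occurrence pair set is read off, so the quadratic pair loop does an O(1) membership test instead of an O(E) set intersection.
import Mathlib
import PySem

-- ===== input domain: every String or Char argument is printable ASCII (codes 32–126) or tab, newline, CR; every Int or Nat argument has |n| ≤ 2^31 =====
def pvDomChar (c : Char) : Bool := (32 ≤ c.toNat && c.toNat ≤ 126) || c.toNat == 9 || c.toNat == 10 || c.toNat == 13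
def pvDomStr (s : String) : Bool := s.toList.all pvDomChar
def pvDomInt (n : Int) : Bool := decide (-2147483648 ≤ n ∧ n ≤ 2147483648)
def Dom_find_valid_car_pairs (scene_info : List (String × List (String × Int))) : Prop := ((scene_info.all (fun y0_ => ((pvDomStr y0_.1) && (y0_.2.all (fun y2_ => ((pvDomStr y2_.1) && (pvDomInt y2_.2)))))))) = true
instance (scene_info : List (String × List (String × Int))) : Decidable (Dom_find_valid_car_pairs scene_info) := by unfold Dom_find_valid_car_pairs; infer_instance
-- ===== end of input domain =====

-- B replaces A's per-pair episode-set intersections by an inverted episode->cars index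
-- and a co-occurrence pair set (faster); both ports build the output set in the same
-- first-insertion order.


-- ===== PORT A =====
def find_valid_car_pairs (scene_info : List (String × List (String × Int))) : List (String × String) :=
  let all_cars : PySem.Set String := PySem.Set.ofList (scene_info.map Prod.fst)
  let valid_pairs : PySem.Set (String × String) :=
    all_cars.foldl (fun vp car1 =>
      all_cars.foldl (fun vp car2 =>
        if car1 ≠ car2 then
          let episodes_car1 : PySem.Set String :=
            PySem.Set.ofList (((PySem.Dict.mk scene_info).getD car1 []).map Prod.fst)
          let episodes_car2 : PySem.Set String :=
            PySem.Set.ofList (((PySem.Dict.mk scene_info).getD car2 []).map Prod.fst)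
          if PySem.Set.inter episodes_car1 episodes_car2 ≠ [] then
            PySem.Set.add vp (car1, car2)
          else vp
        else vp) vp) PySem.Set.empty
  valid_pairs

-- ===== PORT B =====
-- episode -> list of cars containing that episode (the setdefault/append loop)
def fvcpEpisodeCars (scene_info : List (String × List (String × Int))) :
    PySem.Dict String (List String) :=
  scene_info.foldl (fun d p =>
    p.2.foldl (fun d q => d.modify q.1 [] (fun cs => cs ++ [p.1])) d) PySem.Dict.empty

-- ordered pairs of cars co-occurring in some episode group
def fvcpCo (scene_info : List (String × List (String × Int))) : PySem.Set (String × String) :=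
  (fvcpEpisodeCars scene_info).values.foldl (fun co cars =>
    cars.foldl (fun co c1 =>
      cars.foldl (fun co c2 => PySem.Set.add co (c1, c2)) co) co) PySem.Set.empty

def find_valid_car_pairs_alt (scene_info : List (String × List (String × Int))) :
    List (String × String) :=
  let co := fvcpCo scene_info
  scene_info.foldl (fun s p1 =>
    scene_info.foldl (fun s p2 =>
      if p1.1 ≠ p2.1 ∧ (p1.1, p2.1) ∈ co then PySem.Set.add s (p1.1, p2.1) else s) s)
    PySem.Set.empty

-- ===== PRECONDITION & SPEC =====
-- Pre_ requires the car ids (outer keys) to be distinct: the argument encodes a Python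
-- dict, whose keys are necessarily distinct, so no input A accepts is excluded.
def Pre_find_valid_car_pairs (scene_info : List (String × List (String × Int))) : Prop :=
  (scene_info.map Prod.fst).Nodup
instance (scene_info : List (String × List (String × Int))) : Decidable (Pre_find_valid_car_pairs scene_info) := by unfold Pre_find_valid_car_pairs; infer_instance
def pvWitness_find_valid_car_pairs : (List (String × List (String × Int))) :=
  [("a", [("e1", 0), ("e2", 1)]), ("b", [("e2", 3)]), ("c", [("e9", 4)])]
def Spec_find_valid_car_pairs (scene_info : List (String × List (String × Int))) (out : List (String × String)) : Prop := out = find_valid_car_pairs_alt scene_info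
instance (scene_info : List (String × List (String × Int))) (out : List (String × String)) : Decidable (Spec_find_valid_car_pairs scene_info out) := by unfold Spec_find_valid_car_pairs; infer_instance

-- ===== CLAIM (what is proved, stated in full; the proofs are below) =====
def Claim_equal_find_valid_car_pairs : Prop := ∀ (scene_info : List (String × List (String × Int))), Dom_find_valid_car_pairs scene_info → Pre_find_valid_car_pairs scene_info → Spec_find_valid_car_pairs scene_info (find_valid_car_pairs scene_info)

-- ===== LEMMAS AND PROOFS =====

-- the index-building double loop, flattened to one loop over (episode, car) pairs
theorem fvcpEpisodeCars_eq_flat (si : List (String × List (String × Int))) :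
    fvcpEpisodeCars si =
      (si.flatMap (fun p => p.2.map (fun q => (q.1, p.1)))).foldl
        (fun d r => d.modify r.1 [] (fun cs => cs ++ [r.2])) PySem.Dict.empty := by
  rw [List.foldl_flatMap]
  unfold fvcpEpisodeCars
  apply PySem.List.foldl_congr_mem
  intro acc p _
  rw [List.foldl_map]

theorem fvcp_group_mem (si : List (String × List (String × Int))) (ep c : String) :
    c ∈ (fvcpEpisodeCars si).getD ep [] ↔
      ∃ p ∈ si, p.1 = c ∧ ∃ q ∈ p.2, q.1 = ep := by
  rw [fvcpEpisodeCars_eq_flat, PySem.Dict.getD_foldl_modify_append]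
  simp [PySem.Dict.getD_empty, List.mem_filter]

theorem fvcp_nodup_keys (si : List (String × List (String × Int))) :
    (fvcpEpisodeCars si).keys.Nodup := by
  rw [fvcpEpisodeCars_eq_flat]
  exact PySem.Dict.nodup_keys_foldl_modify_key _ _ _ _ _ (by simp [PySem.Dict.keys_empty])

theorem mem_foldl_add {α β : Type} [BEq β] [LawfulBEq β] (l : List α) (f : α → β)
    (s : PySem.Set β) (x : β) :
    x ∈ l.foldl (fun s a => PySem.Set.add s (f a)) s ↔ x ∈ s ∨ ∃ a ∈ l, f a = x := by
  induction l generalizing s with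
  | nil => simp
  | cons h t ih => simp [ih, PySem.Set.mem_add]; tauto

theorem mem_pair_sq (cars l : List String) (s : PySem.Set (String × String)) (x : String × String) :
    x ∈ l.foldl (fun co c1 => cars.foldl (fun co c2 => PySem.Set.add co (c1, c2)) co) s ↔
      x ∈ s ∨ ∃ c1 ∈ l, c1 = x.1 ∧ x.2 ∈ cars := by
  induction l generalizing s with
  | nil => simp
  | cons h t ih =>
    simp only [List.foldl_cons, ih, mem_foldl_add]
    constructor
    · rintro (⟨hs | ⟨a, ha, rfl⟩⟩ | h)
      · exact Or.inl hs
      · exact Or.inr ⟨h, by simp, rfl, ha⟩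
      · obtain ⟨c1, hc1, h1, h2⟩ := h; exact Or.inr ⟨c1, by simp [hc1], h1, h2⟩
    · rintro (hs | ⟨c1, hc1, h1, h2⟩)
      · exact Or.inl (Or.inl hs)
      · rcases List.mem_cons.mp hc1 with rfl | hc1
        · exact Or.inl (Or.inr ⟨x.2, h2, by rw [h1]⟩)
        · exact Or.inr ⟨c1, hc1, h1, h2⟩

theorem mem_fvcpCo (si : List (String × List (String × Int))) (x : String × String) :
    x ∈ fvcpCo si ↔ ∃ cars ∈ (fvcpEpisodeCars si).values, x.1 ∈ cars ∧ x.2 ∈ cars := by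
  unfold fvcpCo
  generalize (fvcpEpisodeCars si).values = gs
  suffices h : ∀ s : PySem.Set (String × String),
      x ∈ gs.foldl (fun co cars => cars.foldl (fun co c1 =>
        cars.foldl (fun co c2 => PySem.Set.add co (c1, c2)) co) co) s ↔
      x ∈ s ∨ ∃ cars ∈ gs, x.1 ∈ cars ∧ x.2 ∈ cars by simpa using h PySem.Set.empty
  induction gs with
  | nil => simp
  | cons g t ih =>
    intro s
    simp only [List.foldl_cons, ih, mem_pair_sq]
    constructor
    · rintro (⟨hs | ⟨c1, hc1, rfl, h2⟩⟩ | ⟨cars, hc, h⟩)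
      · exact Or.inl hs
      · exact Or.inr ⟨g, by simp, hc1, h2⟩
      · exact Or.inr ⟨cars, by simp [hc], h⟩
    · rintro (hs | ⟨cars, hc, h1, h2⟩)
      · exact Or.inl (Or.inl hs)
      · rcases List.mem_cons.mp hc with rfl | hc
        · exact Or.inl (Or.inr ⟨x.1, h1, rfl, h2⟩)
        · exact Or.inr ⟨cars, hc, h1, h2⟩

-- co membership in terms of the episode groups
theorem mem_fvcpCo_iff_group (si : List (String × List (String × Int))) (x : String × String) :
    x ∈ fvcpCo si ↔ ∃ ep, x.1 ∈ (fvcpEpisodeCars si).getD ep [] ∧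
      x.2 ∈ (fvcpEpisodeCars si).getD ep [] := by
  rw [mem_fvcpCo]
  constructor
  · rintro ⟨cars, hc, h1, h2⟩
    obtain ⟨⟨ep, v⟩, hm, rfl⟩ := List.mem_map.mp hc
    have := PySem.Dict.getD_of_mem_items _ hm (fvcp_nodup_keys si) []
    exact ⟨ep, by rw [this]; exact ⟨h1, h2⟩⟩
  · rintro ⟨ep, h1, h2⟩
    have hcon : (fvcpEpisodeCars si).contains ep = true := by
      by_contra h
      rw [PySem.Dict.getD_of_not_contains _ _ (by simpa using h)] at h1
      simp at h1
    rw [PySem.Dict.contains_eq_isSome_get?] at hcon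
    obtain ⟨v, hv⟩ := Option.isSome_iff_exists.mp hcon
    have hit := PySem.Dict.mem_items_of_get?_eq_some _ hv
    have hg := PySem.Dict.getD_of_get?_eq_some _ [] hv
    refine ⟨v, ?_, by rw [hg] at h1 h2; exact ⟨h1, h2⟩⟩
    have : v = (ep, v).2 := rfl
    rw [this, PySem.Dict.values]
    exact List.mem_map_of_mem hit

theorem fvcp_keys_mk_nodup (si : List (String × List (String × Int)))
    (hn : (si.map Prod.fst).Nodup) : (PySem.Dict.mk si).keys.Nodup := by
  simpa [PySem.Dict.keys] using hn

theorem fvcp_val_unique (si : List (String × List (String × Int)))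
    (hn : (si.map Prod.fst).Nodup) {p p' : String × List (String × Int)}
    (hp : p ∈ si) (hp' : p' ∈ si) (h : p.1 = p'.1) : p.2 = p'.2 := by
  have h1 := PySem.Dict.getD_of_mem_items (PySem.Dict.mk si) (k := p.1) (v := p.2)
    hp (fvcp_keys_mk_nodup si hn) []
  have h2 := PySem.Dict.getD_of_mem_items (PySem.Dict.mk si) (k := p'.1) (v := p'.2)
    hp' (fvcp_keys_mk_nodup si hn) []
  rw [h] at h1
  rw [h1] at h2
  exact h2

-- A's "episode key-sets intersect" test agrees with B's co-occurrence set membership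
theorem fvcp_cond_iff (si : List (String × List (String × Int)))
    (hn : (si.map Prod.fst).Nodup) {p1 p2 : String × List (String × Int)}
    (hp1 : p1 ∈ si) (hp2 : p2 ∈ si) :
    (PySem.Set.inter (PySem.Set.ofList (((PySem.Dict.mk si).getD p1.1 []).map Prod.fst))
        (PySem.Set.ofList (((PySem.Dict.mk si).getD p2.1 []).map Prod.fst)) ≠ []) ↔
      (p1.1, p2.1) ∈ fvcpCo si := by
  have g1 := PySem.Dict.getD_of_mem_items (PySem.Dict.mk si) (k := p1.1) (v := p1.2)
    hp1 (fvcp_keys_mk_nodup si hn) []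
  have g2 := PySem.Dict.getD_of_mem_items (PySem.Dict.mk si) (k := p2.1) (v := p2.2)
    hp2 (fvcp_keys_mk_nodup si hn) []
  rw [g1, g2, mem_fvcpCo_iff_group]
  constructor
  · intro hne
    obtain ⟨e, he⟩ := List.exists_mem_of_ne_nil _ hne
    rw [PySem.Set.mem_inter, PySem.Set.mem_ofList, PySem.Set.mem_ofList] at he
    obtain ⟨he1, he2⟩ := he
    obtain ⟨q1, hq1, hq1e⟩ := List.mem_map.mp he1
    obtain ⟨q2, hq2, hq2e⟩ := List.mem_map.mp he2
    exact ⟨e, (fvcp_group_mem si e p1.1).mpr ⟨p1, hp1, rfl, q1, hq1, hq1e⟩,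
      (fvcp_group_mem si e p2.1).mpr ⟨p2, hp2, rfl, q2, hq2, hq2e⟩⟩
  · rintro ⟨ep, h1, h2⟩
    obtain ⟨r1, hr1, hr1c, q1, hq1, hq1e⟩ := (fvcp_group_mem si ep p1.1).mp h1
    obtain ⟨r2, hr2, hr2c, q2, hq2, hq2e⟩ := (fvcp_group_mem si ep p2.1).mp h2
    have e1 : r1.2 = p1.2 := fvcp_val_unique si hn hr1 hp1 hr1c
    have e2 : r2.2 = p2.2 := fvcp_val_unique si hn hr2 hp2 hr2c
    apply List.ne_nil_of_mem (a := ep)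
    rw [PySem.Set.mem_inter, PySem.Set.mem_ofList, PySem.Set.mem_ofList]
    exact ⟨List.mem_map.mpr ⟨q1, e1 ▸ hq1, hq1e⟩, List.mem_map.mpr ⟨q2, e2 ▸ hq2, hq2e⟩⟩

theorem fvcp_main (si : List (String × List (String × Int)))
    (hn : (si.map Prod.fst).Nodup) :
    find_valid_car_pairs si = find_valid_car_pairs_alt si := by
  simp only [find_valid_car_pairs, find_valid_car_pairs_alt,
    PySem.Set.ofList_eq_self_of_nodup _ hn, List.foldl_map]
  apply PySem.List.foldl_congr_mem
  intro acc p1 hp1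
  apply PySem.List.foldl_congr_mem
  intro acc2 p2 hp2
  by_cases hne : p1.1 ≠ p2.1
  · have hcond := fvcp_cond_iff si hn hp1 hp2
    by_cases hm : (p1.1, p2.1) ∈ fvcpCo si
    · simp [hne, hm, hcond.mpr hm]
    · simp [hne, hm, (not_iff_not.mpr hcond).mpr hm]
  · simp [hne]

-- ===== VERDICT (by name: the statement is the Claim_ definition above) =====
theorem find_valid_car_pairs_spec : Claim_equal_find_valid_car_pairs := by
  intro si _ hpre
  unfold Spec_find_valid_car_pairs
  exact fvcp_main si hpre
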